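-- pv_equiv track=rewrite | github.com/raphajacobson/CS-2 | what_is_in_a_name.py | middle_name
-- ===== SOURCE A (Python) =====
-- def middle_name(user_name):
--     '''
--     prints user's middle name(s)
--     Args:
--         user_name (string): any given word
--     Returns:
--         the user's middle name(s)
--     '''
--     lastspace = len(user_name)-1
--     for i in range(len(user_name)-1, -1, -1):
--         if user_name[i] == " ":
--             break
--         else:
--             lastspace = lastspace -1
--
--     firstspace = 0
--     for i in range(0,len(user_name)):
--
--         if user_name[i] == " ":
--             firstspace = firstspace+1
--             break
--         else:
--             firstspace = firstspace +1
--
--     middle = user_name[firstspace:lastspace]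
--     return middle
-- ===== SOURCE B (Python) =====
-- def middle_name(user_name):
--     '''
--     prints user's middle name(s)
--     Args:
--         user_name (string): any given word
--     Returns:
--         the user's middle name(s)
--     '''
--     parts = user_name.split(" ")
--     return " ".join(parts[1:-1])
-- ===== Notes on version B (the rewrite author's own statement) =====
-- stated objective: idiomatic
-- what changed: Replaces the two index-scanning loops (one backwards for the last space, one forwards for the first space) plus a slice by tokenizing on the single-space separator and rejoining all tokens except the first and last.
import Mathlib
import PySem

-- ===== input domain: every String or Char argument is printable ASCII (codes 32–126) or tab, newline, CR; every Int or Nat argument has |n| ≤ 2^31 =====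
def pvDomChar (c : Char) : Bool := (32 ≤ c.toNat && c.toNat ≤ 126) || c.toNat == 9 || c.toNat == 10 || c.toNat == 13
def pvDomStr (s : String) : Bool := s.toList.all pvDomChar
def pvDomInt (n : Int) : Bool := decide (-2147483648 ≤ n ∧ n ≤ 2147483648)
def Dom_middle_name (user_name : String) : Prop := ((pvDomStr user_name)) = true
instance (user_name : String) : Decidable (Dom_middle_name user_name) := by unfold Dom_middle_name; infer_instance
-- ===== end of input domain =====

-- B replaces A's two index-scanning loops (backwards for the last space, forwards for the first)
-- plus a slice by a split on the single-space separator and a join of all tokens but the first and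
-- last: idiomatic, and measurably faster in CPython (C-implemented split/join vs per-char loops).

-- ===== PORT A =====
-- the backwards loop 'for i in range(len(s)-1, -1, -1): if s[i]==" ": break; else lastspace -= 1'
def aLastLoop (cs : List Char) : List Int → Int → Int
  | [], acc => acc
  | i :: is, acc =>
    match PySem.List.pyGet? cs i with
    | some c => if c = ' ' then acc else aLastLoop cs is (acc - 1)
    | none => acc   -- unreachable: i is drawn from range(len(cs)-1, -1, -1)

-- the forwards loop 'for i in range(0, len(s)): firstspace += 1; if s[i]==" ": break'
def aFirstLoop (cs : List Char) : List Int → Int → Int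
  | [], acc => acc
  | i :: is, acc =>
    match PySem.List.pyGet? cs i with
    | some c => if c = ' ' then acc + 1 else aFirstLoop cs is (acc + 1)
    | none => acc   -- unreachable: i is drawn from range(0, len(cs))

def middle_name (user_name : String) : String :=
  let n : Int := PySem.Str.len user_name
  let lastspace := aLastLoop user_name.toList (PySem.List.pyRange (n - 1) (-1) (-1)) (n - 1)
  let firstspace := aFirstLoop user_name.toList (PySem.List.pyRange 0 n 1) 0
  PySem.Str.slice user_name (some firstspace) (some lastspace)

-- ===== PORT B =====
def middle_name_alt (user_name : String) : String :=
  match PySem.Str.split? user_name " " with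
  | some parts => PySem.Str.join " " (PySem.List.slice parts (some 1) (some (-1)))
  | none => ""   -- unreachable: the separator " " is non-empty

-- ===== PRECONDITION & SPEC =====
def Spec_middle_name (user_name : String) (out : String) : Prop := out = middle_name_alt user_name
instance (user_name : String) (out : String) : Decidable (Spec_middle_name user_name out) := by unfold Spec_middle_name; infer_instance

-- ===== CLAIM (what is proved, stated in full; the proofs are below) =====
def Claim_equal_middle_name : Prop := ∀ (user_name : String), Dom_middle_name user_name → Spec_middle_name user_name (middle_name user_name)

-- ===== LEMMAS AND PROOFS =====

-- length of the space-free prefix / suffix of a list of characters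
def pvTw (l : List Char) : Nat := (l.takeWhile (· != ' ')).length
def pvRtw (l : List Char) : Nat := (l.reverse.takeWhile (· != ' ')).length

-- structural reformulation of PySem.Chars.splitOn for the one-character separator [' ']
def pvSplit : List Char → List Char → List (List Char)
  | cur, [] => [cur.reverse]
  | cur, c :: rest => if c = ' ' then cur.reverse :: pvSplit [] rest else pvSplit (c :: cur) rest

theorem pvSplit_ne_nil (cur l : List Char) : pvSplit cur l ≠ [] := by
  induction l generalizing cur with
  | nil => simp [pvSplit]
  | cons c rest ih =>
    simp only [pvSplit]
    split
    · simp
    · exact ih _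

theorem splitOn_go_eq (fuel : Nat) (l cur : List Char) (acc : List (List Char))
    (h : l.length < fuel) :
    PySem.Chars.splitOn.go [' '] fuel l cur acc = acc.reverse ++ pvSplit cur l := by
  induction fuel generalizing l cur acc with
  | zero => omega
  | succ fuel ih =>
    cases l with
    | nil => simp [PySem.Chars.splitOn.go, pvSplit]
    | cons c rest =>
      rw [PySem.Chars.splitOn.go]
      by_cases hc : c = ' '
      · subst hc
        simp only [List.isPrefixOf, BEq.rfl, Bool.true_and, if_true]
        rw [ih _ _ _ (by simp at h ⊢; omega)]
        simp [pvSplit]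
      · have : ([' '].isPrefixOf (c :: rest)) = false := by
          simp [List.isPrefixOf]; exact fun hx => absurd hx.symm hc
        rw [this]
        simp only [Bool.false_eq_true, if_false]
        rw [ih _ _ _ (by simp at h ⊢; omega)]
        simp [pvSplit, hc]

theorem splitOn_eq (cs : List Char) :
    PySem.Chars.splitOn cs [' '] = pvSplit [] cs := by
  have := splitOn_go_eq (cs.length + 1) cs [] [] (by omega)
  simpa [PySem.Chars.splitOn] using this

theorem pvSplit_not_mem (cur l : List Char) (h : ' ' ∉ l) :
    pvSplit cur l = [cur.reverse ++ l] := by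
  induction l generalizing cur with
  | nil => simp [pvSplit]
  | cons c rest ih =>
    simp only [List.mem_cons, not_or] at h
    rw [pvSplit, if_neg (fun hc => h.1 hc.symm), ih _ h.2]
    simp

theorem pvSplit_append (cur pre rest : List Char) (h : ' ' ∉ pre) :
    pvSplit cur (pre ++ ' ' :: rest) = (cur.reverse ++ pre) :: pvSplit [] rest := by
  induction pre generalizing cur with
  | nil => simp [pvSplit]
  | cons c p ih =>
    simp only [List.mem_cons, not_or] at h
    rw [List.cons_append, pvSplit, if_neg (fun hc => h.1 hc.symm), ih _ h.2]
    simp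

theorem tw_of_not_mem (l : List Char) (h : ' ' ∉ l) : l.takeWhile (· != ' ') = l := by
  induction l with
  | nil => rfl
  | cons c rest ih =>
    simp only [List.mem_cons, not_or] at h
    rw [List.takeWhile_cons, if_pos (by simpa using fun hc => h.1 hc.symm), ih h.2]

theorem tw_append_of_mem (a b : List Char) (h : ' ' ∈ a) :
    (a ++ b).takeWhile (· != ' ') = a.takeWhile (· != ' ') := by
  induction a with
  | nil => simp at h
  | cons c rest ih =>
    by_cases hc : c = ' '
    · subst hc; simp
    · have : ' ' ∈ rest := by rcases List.mem_cons.1 h with h1 | h1; exact absurd h1.symm hc; exact h1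
      rw [List.cons_append, List.takeWhile_cons, List.takeWhile_cons, ih this]

theorem tw_lt_of_mem (l : List Char) (h : ' ' ∈ l) : (l.takeWhile (· != ' ')).length < l.length := by
  induction l with
  | nil => simp at h
  | cons c rest ih =>
    by_cases hc : c = ' '
    · subst hc; simp
    · have : ' ' ∈ rest := by rcases List.mem_cons.1 h with h1 | h1; exact absurd h1.symm hc; exact h1
      rw [List.takeWhile_cons, if_pos (by simpa using fun hx => hc hx)]
      simpa using ih this

theorem rtw_append_of_mem (p r : List Char) (h : ' ' ∈ r) :
    pvRtw (p ++ ' ' :: r) = pvRtw r := by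
  unfold pvRtw
  rw [List.reverse_append, List.reverse_cons, List.append_assoc,
    tw_append_of_mem _ _ (by simpa using h)]

theorem tw_append_space (a b : List Char) (h : ' ' ∉ a) :
    (a ++ ' ' :: b).takeWhile (· != ' ') = a := by
  induction a with
  | nil => simp
  | cons c rest ih =>
    simp only [List.mem_cons, not_or] at h
    rw [List.cons_append, List.takeWhile_cons,
      if_pos (by simpa using fun hx => h.1 hx.symm), ih h.2]

theorem rtw_append_not_mem (p r : List Char) (h : ' ' ∉ r) :
    pvRtw (p ++ ' ' :: r) = r.length := by
  unfold pvRtw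
  rw [List.reverse_append, List.reverse_cons, List.append_assoc, List.singleton_append,
    tw_append_space _ _ (fun hx => h (List.mem_reverse.1 hx)), List.length_reverse]

theorem rtw_lt_of_mem (l : List Char) (h : ' ' ∈ l) : pvRtw l < l.length := by
  have := tw_lt_of_mem l.reverse (by simpa using h)
  simpa [pvRtw] using this

theorem decomp_of_mem (cs : List Char) (h : ' ' ∈ cs) :
    ∃ p r, cs = p ++ ' ' :: r ∧ ' ' ∉ p ∧ p.length = pvTw cs := by
  induction cs with
  | nil => simp at h
  | cons c rest ih =>
    by_cases hc : c = ' '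
    · subst hc
      exact ⟨[], rest, by simp, by simp, by simp [pvTw]⟩
    · have : ' ' ∈ rest := by rcases List.mem_cons.1 h with h1 | h1; exact absurd h1.symm hc; exact h1
      obtain ⟨p, r, hcs, hp, hl⟩ := ih this
      refine ⟨c :: p, r, by simp [hcs], by simp [hp]; exact fun hx => hc hx.symm, ?_⟩
      simp [pvTw, hc] at hl ⊢
      omega

theorem slice_one_neg_one {α : Type} (xs : List α) :
    PySem.List.slice xs (some 1) (some (-1)) = xs.tail.dropLast := by
  cases xs with
  | nil => rfl
  | cons x t =>
    simp [PySem.List.slice, PySem.List.clampIdx]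
    rw [List.dropLast_eq_take, if_neg (by omega : ¬((t.length : Int) < 0))]

theorem slice_map {α β : Type} (f : α → β) (xs : List α) (a b : Option Int) :
    PySem.List.slice (xs.map f) a b = (PySem.List.slice xs a b).map f := by
  simp [PySem.List.slice, List.map_take, List.map_drop]

-- B's core: joining all but the last piece of the split recovers the text before the last space
theorem join_dropLast_split (r : List Char) (h : ' ' ∈ r) :
    PySem.Chars.join [' '] ((pvSplit [] r).dropLast) = r.take (r.length - 1 - pvRtw r) := by
  obtain ⟨p, q, hr, hp, -⟩ := decomp_of_mem r h
  rw [hr, pvSplit_append [] p q hp]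
  simp only [List.reverse_nil, List.nil_append]
  by_cases hq : ' ' ∈ q
  · have ihq := join_dropLast_split q hq
    obtain ⟨p', q', hq', hp', -⟩ := decomp_of_mem q hq
    have hM : pvSplit [] q = p' :: pvSplit [] q' := by
      rw [hq', pvSplit_append [] p' q' hp']; simp
    have hMd : (pvSplit [] q).dropLast ≠ [] := by
      rw [hM]
      cases hx : pvSplit [] q' with
      | nil => exact absurd hx (pvSplit_ne_nil [] q')
      | cons a l => simp [List.dropLast_cons_of_ne_nil]
    rw [List.dropLast_cons_of_ne_nil (by rw [hM]; simp)]
    obtain ⟨x, xs, hxx⟩ := List.exists_cons_of_ne_nil hMd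
    rw [hxx, PySem.Chars.join_cons_cons, ← hxx, ihq]
    have hlt := rtw_lt_of_mem q hq
    have hrtw := rtw_append_of_mem p q hq
    rw [hrtw]
    have harith : (p ++ ' ' :: q).length - 1 - pvRtw q
        = p.length + ((q.length - 1 - pvRtw q) + 1) := by
      simp only [List.length_append, List.length_cons]
      omega
    rw [harith, List.take_length_add_append, List.take_cons (by omega)]
    simp
  · rw [pvSplit_not_mem [] q hq]
    simp only [List.reverse_nil, List.nil_append]
    have hd : ([p, q] : List (List Char)).dropLast = [p] := rfl
    rw [hd, PySem.Chars.join_singleton, rtw_append_not_mem p q hq]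
    have harith : (p ++ ' ' :: q).length - 1 - q.length = p.length := by
      simp only [List.length_append, List.length_cons]; omega
    rw [harith, List.take_left]
termination_by r.length
decreasing_by simp only [hr, List.length_append, List.length_cons]; omega

theorem aFirstLoop_spec (suf pre : List Char) :
    aFirstLoop (pre ++ suf) (PySem.List.pyRange (pre.length : Int) ((pre ++ suf).length : Int) 1)
      (pre.length : Int)
    = (pre.length : Int) + min ((pvTw suf : Int) + 1) (suf.length : Int) := by
  induction suf generalizing pre with
  | nil =>
    rw [PySem.List.pyRange_one_eq_nil (by simp)]
    simp [aFirstLoop, pvTw]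
  | cons c rest ih =>
    rw [PySem.List.pyRange_one_cons (by simp)]
    rw [aFirstLoop]
    have hget : PySem.List.pyGet? (pre ++ c :: rest) (pre.length : Int) = some c := by
      rw [PySem.List.pyGet?_natCast, List.getElem?_append_right (le_refl _)]
      simp
    rw [hget]
    by_cases hc : c = ' '
    · subst hc
      simp [pvTw]
    · simp only [if_neg hc]
      have h1 : pre ++ c :: rest = (pre ++ [c]) ++ rest := by simp
      have h2 : (pre.length : Int) + 1 = (((pre ++ [c]).length : Nat) : Int) := by simp
      rw [h1, h2, ih (pre ++ [c])]
      have h3 : pvTw (c :: rest) = pvTw rest + 1 := by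
        simp [pvTw, hc]
      rw [h3]
      simp
      omega

theorem aLastLoop_spec (cs : List Char) (k : Nat) (hk : k ≤ cs.length) :
    aLastLoop cs (PySem.List.pyRange ((k : Int) - 1) (-1) (-1)) ((k : Int) - 1)
    = (k : Int) - 1 - (pvRtw (cs.take k) : Int) := by
  induction k with
  | zero =>
    rw [PySem.List.pyRange_neg_one_eq_nil (by omega)]
    simp [aLastLoop, pvRtw]
  | succ k ih =>
    have hk' : k < cs.length := by omega
    have hs : ((k : Int) + 1) - 1 = (k : Int) := by omega
    push_cast
    rw [hs, PySem.List.pyRange_neg_one_cons (by omega)]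
    rw [aLastLoop]
    have hget : PySem.List.pyGet? cs (k : Int) = some cs[k] := by
      rw [PySem.List.pyGet?_natCast]
      exact List.getElem?_eq_getElem hk'
    rw [hget]
    have htake : cs.take (k + 1) = cs.take k ++ [cs[k]] := by
      rw [List.take_add_one, List.getElem?_eq_getElem hk']
      rfl
    by_cases hc : cs[k] = ' '
    · simp only [if_pos hc]
      have : pvRtw (cs.take (k + 1)) = 0 := by
        simp [pvRtw, htake, hc]
      rw [this]
      simp
    · simp only [if_neg hc]
      have hrev : (cs.take (k + 1)).reverse = cs[k] :: (cs.take k).reverse := by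
        rw [htake]; simp
      have : pvRtw (cs.take (k + 1)) = pvRtw (cs.take k) + 1 := by
        unfold pvRtw
        rw [hrev, List.takeWhile_cons, if_pos (by simpa using fun hx => hc hx)]
        simp
      rw [this, ih (by omega)]
      push_cast
      omega

-- the list-level heart of the equivalence
theorem main_list (cs : List Char) :
    PySem.List.slice cs (some (min ((pvTw cs : Int) + 1) (cs.length : Int)))
      (some ((cs.length : Int) - 1 - (pvRtw cs : Int)))
    = PySem.Chars.join [' '] (PySem.List.slice (pvSplit [] cs) (some 1) (some (-1))) := by
  rw [slice_one_neg_one]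
  by_cases h : ' ' ∈ cs
  · obtain ⟨p, r, hcs, hp, hlen⟩ := decomp_of_mem cs h
    have htw : pvTw cs = p.length := hlen.symm
    rw [htw, hcs, pvSplit_append [] p r hp]
    simp only [List.reverse_nil, List.nil_append, List.tail_cons, List.length_append,
      List.length_cons]
    have hmin : min ((p.length : Int) + 1) ((p.length + (r.length + 1) : Nat) : Int)
        = (p.length : Int) + 1 := by push_cast; omega
    rw [hmin]
    by_cases hr : ' ' ∈ r
    · have hlt := rtw_lt_of_mem r hr
      rw [rtw_append_of_mem p r hr]
      have hb : ((p.length + (r.length + 1) : Nat) : Int) - 1 - (pvRtw r : Int)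
          = ((p.length + (r.length - pvRtw r) : Nat) : Int) := by push_cast; omega
      rw [hb, show ((p.length : Int) + 1) = ((p.length + 1 : Nat) : Int) by push_cast; ring,
        PySem.List.slice_toNat _ (by positivity) (by positivity)]
      simp only [Int.toNat_natCast]
      have hdrop : (p ++ ' ' :: r).drop (p.length + 1) = r := by
        have h1 := List.drop_length_add_append (l₁ := p) (l₂ := ' ' :: r) 1
        simp only [List.drop_succ_cons, List.drop_zero] at h1
        exact h1
      rw [hdrop, join_dropLast_split r hr]
      congr 1
      omega
    · rw [rtw_append_not_mem p r hr, pvSplit_not_mem [] r hr]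
      simp only [List.reverse_nil, List.nil_append]
      have hd : ([r] : List (List Char)).dropLast = [] := rfl
      rw [hd, PySem.Chars.join_nil]
      have hb : ((p.length + (r.length + 1) : Nat) : Int) - 1 - (r.length : Int)
          = ((p.length : Nat) : Int) := by push_cast; omega
      rw [hb, show ((p.length : Int) + 1) = ((p.length + 1 : Nat) : Int) by push_cast; ring,
        PySem.List.slice_toNat _ (by positivity) (by positivity)]
      simp
  · rw [pvSplit_not_mem [] cs h]
    simp only [List.reverse_nil, List.nil_append, List.tail_cons, List.dropLast_nil,
      PySem.Chars.join_nil]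
    have htw : pvTw cs = cs.length := by
      unfold pvTw; rw [tw_of_not_mem cs h]
    have hrtw : pvRtw cs = cs.length := by
      unfold pvRtw
      rw [tw_of_not_mem _ (fun hx => h (List.mem_reverse.1 hx)), List.length_reverse]
    rw [htw, hrtw]
    have hmin : min ((cs.length : Int) + 1) ((cs.length : Nat) : Int)
        = ((cs.length : Nat) : Int) := by omega
    rw [hmin]
    apply List.eq_nil_of_length_eq_zero
    rw [PySem.List.length_slice, PySem.List.clampIdx_natCast]
    have : PySem.List.clampIdx cs.length ((cs.length : Int) - 1 - (cs.length : Int))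
        = PySem.List.clampIdx cs.length (-1) := by norm_num
    rw [this, PySem.List.clampIdx_neg_one]
    omega

-- ===== VERDICT (by name: the statement is the Claim_ definition above) =====
theorem middle_name_spec : Claim_equal_middle_name := by
  intro s _
  unfold Spec_middle_name middle_name middle_name_alt
  have hsplit : PySem.Str.split? s " "
      = some ((PySem.Chars.splitOn s.toList [' ']).map String.ofList) := by
    simp [PySem.Str.split?, PySem.Chars.split?]
  rw [hsplit]
  dsimp only
  have hfirst := aFirstLoop_spec s.toList []
  simp only [List.nil_append, List.length_nil, Nat.cast_zero, zero_add] at hfirst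
  have hlast := aLastLoop_spec s.toList s.toList.length (le_refl _)
  rw [List.take_length] at hlast
  have hlen : PySem.Str.len s = (s.toList.length : Int) := rfl
  rw [hlen, hfirst, hlast]
  apply String.toList_inj.mp
  rw [PySem.Str.toList_slice, PySem.Str.toList_join, slice_map]
  simp only [List.map_map, Function.comp_def, String.toList_ofList, List.map_id',
    PySem.Chars.slice_eq_listSlice]
  rw [splitOn_eq]
  have hm : (" " : String).toList = [' '] := rfl
  rw [hm]
  exact main_list s.toList
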